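-- pv_equiv track=rewrite | github.com/shivamr021/DSA | Coding Ninjas/Count Palindrome Words In A String.py | countNumberOfPalindromeWords
-- ===== SOURCE A (Python) =====
-- def countNumberOfPalindromeWords(s):
--     #Your code goes here
--     words = s.split()
--     cnt = 0
--     for word in words:
--         word = word.lower()
--         if word == word[::-1]:
--             cnt += 1
--
--     return cnt
-- ===== SOURCE B (Python) =====
-- def countNumberOfPalindromeWords(s):
--     cnt = 0
--     for word in s.split():
--         w = word.lower()
--         left, right = 0, len(w) - 1
--         ok = True
--         while left < right:
--             if w[left] != w[right]:
--                 ok = False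
--                 break
--             left += 1
--             right -= 1
--         if ok:
--             cnt += 1
--     return cnt
-- ===== Notes on version B (the rewrite author's own statement) =====
-- stated objective: alternative
-- what changed: Palindrome test rewritten as an explicit two-pointer inward index scan with early break instead of building the reversed string and comparing whole strings.
import Mathlib
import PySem

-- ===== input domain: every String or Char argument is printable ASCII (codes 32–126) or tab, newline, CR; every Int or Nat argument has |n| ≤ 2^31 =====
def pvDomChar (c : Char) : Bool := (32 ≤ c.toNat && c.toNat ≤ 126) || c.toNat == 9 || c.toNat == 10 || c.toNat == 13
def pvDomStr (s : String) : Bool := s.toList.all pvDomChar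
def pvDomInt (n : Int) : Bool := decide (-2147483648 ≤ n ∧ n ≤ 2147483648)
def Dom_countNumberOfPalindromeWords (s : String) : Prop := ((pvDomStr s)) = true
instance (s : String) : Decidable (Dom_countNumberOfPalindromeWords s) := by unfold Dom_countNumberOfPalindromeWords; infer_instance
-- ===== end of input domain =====

-- B replaces A's reversed-string comparison by an explicit two-pointer inward index scan (alternative decomposition, same cost).

-- ===== PORT A =====
-- for word in words: word = word.lower(); if word == word[::-1]: cnt += 1
def countNumberOfPalindromeWords (s : String) : Int :=
  (PySem.Str.split₀ s).foldl
    (fun cnt word =>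
      let w := PySem.Str.lower word
      if PySem.Str.slice? w none none (-1) = some w then cnt + 1 else cnt) 0

-- ===== PORT B =====
-- the while-loop 'while left < right: if w[left] != w[right]: ok=False; break; left+=1; right-=1'
-- (indices are always in range there, so w[i] is w.toList[i]?)
def pvTwoPtr (w : List Char) (left right : Nat) : Bool :=
  if left < right then
    if w[left]? = w[right]? then pvTwoPtr w (left + 1) (right - 1) else false
  else true
termination_by right - left

def countNumberOfPalindromeWords_alt (s : String) : Int :=
  (PySem.Str.split₀ s).foldl
    (fun cnt word =>
      let w := (PySem.Str.lower word).toList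
      if pvTwoPtr w 0 (w.length - 1) then cnt + 1 else cnt) 0

-- ===== PRECONDITION & SPEC =====
def Spec_countNumberOfPalindromeWords (s : String) (out : Int) : Prop := out = countNumberOfPalindromeWords_alt s
instance (s : String) (out : Int) : Decidable (Spec_countNumberOfPalindromeWords s out) := by unfold Spec_countNumberOfPalindromeWords; infer_instance

-- ===== CLAIM (what is proved, stated in full; the proofs are below) =====
def Claim_equal_countNumberOfPalindromeWords : Prop := ∀ (s : String), Dom_countNumberOfPalindromeWords s → Spec_countNumberOfPalindromeWords s (countNumberOfPalindromeWords s)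

-- ===== LEMMAS AND PROOFS =====

-- the two-pointer scan checks exactly the mirror property on [l, r]
theorem pvTwoPtr_iff (w : List Char) (l r : Nat) :
    pvTwoPtr w l r = true ↔ ∀ i, l ≤ i → i ≤ r → w[i]? = w[l + r - i]? := by
  fun_induction pvTwoPtr w l r with
  | case1 l r hlr hw ih =>
    simp only [ih]
    constructor
    · intro h i hi1 hi2
      rcases Nat.eq_or_lt_of_le hi1 with he | hlt1
      · subst he
        have : l + r - l = r := by omega
        rw [this]; exact hw
      · rcases Nat.eq_or_lt_of_le hi2 with he | hlt2
        · rw [he]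
          have : l + r - r = l := by omega
          rw [this]; exact hw.symm
        · have := h i (by omega) (by omega)
          have heq : (l + 1) + (r - 1) - i = l + r - i := by omega
          rw [heq] at this; exact this
    · intro h i hi1 hi2
      have := h i (by omega) (by omega)
      have heq : (l + 1) + (r - 1) - i = l + r - i := by omega
      rw [heq]; exact this
  | case2 l r hlr hw =>
    simp only [Bool.false_eq_true, false_iff]
    intro h
    have := h l (le_refl l) (by omega)
    have heq : l + r - l = r := by omega
    rw [heq] at this; exact hw this
  | case3 l r hlr =>
    simp only [true_iff]
    intro i hi1 hi2
    have : i = l ∧ l + r - i = i := by omega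
    rw [this.2]

-- the full scan from the ends decides reverse-equality
theorem pvTwoPtr_reverse (w : List Char) :
    pvTwoPtr w 0 (w.length - 1) = true ↔ w.reverse = w := by
  rw [pvTwoPtr_iff]
  constructor
  · intro h
    apply List.ext_getElem?
    intro i
    by_cases hi : i < w.length
    · rw [List.getElem?_reverse hi]
      have := h i (Nat.zero_le _) (by omega)
      have heq : 0 + (w.length - 1) - i = w.length - 1 - i := by omega
      rw [heq] at this; exact this.symm
    · rw [List.getElem?_eq_none (by simp only [List.length_reverse]; omega), List.getElem?_eq_none (by omega)]
  · intro h i _ hi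
    by_cases hw : w.length = 0
    · simp [List.eq_nil_of_length_eq_zero hw]
    · have hi' : i < w.length := by omega
      have := List.getElem?_reverse (l := w) hi'
      rw [h] at this
      have heq : 0 + (w.length - 1) - i = w.length - 1 - i := by omega
      rw [heq]; exact this

-- A's palindrome test equals B's two-pointer test, per word
theorem pvTest_eq (word : String) :
    (PySem.Str.slice? (PySem.Str.lower word) none none (-1) = some (PySem.Str.lower word))
      ↔ pvTwoPtr (PySem.Str.lower word).toList 0 ((PySem.Str.lower word).toList.length - 1) = true := by
  set w := PySem.Str.lower word with hw
  rw [PySem.Str.slice?_none_none_neg_one, pvTwoPtr_reverse, Option.some.injEq]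
  constructor
  · intro h
    have := congrArg String.toList h
    simpa using this
  · intro h
    have : String.ofList w.toList.reverse = String.ofList w.toList := by rw [h]
    simpa using this

-- pointwise-equal step functions give equal folds
theorem pvFoldl_ext (f g : Int → String → Int) (h : ∀ a x, f a x = g a x) :
    ∀ (l : List String) (a : Int), l.foldl f a = l.foldl g a := by
  intro l
  induction l with
  | nil => intro a; rfl
  | cons x xs ih => intro a; simp only [List.foldl_cons, h a x, ih]

-- ===== VERDICT (by name: the statement is the Claim_ definition above) =====
theorem countNumberOfPalindromeWords_spec : Claim_equal_countNumberOfPalindromeWords := by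
  intro s _
  unfold Spec_countNumberOfPalindromeWords countNumberOfPalindromeWords countNumberOfPalindromeWords_alt
  apply pvFoldl_ext
  intro a word
  simp only []
  by_cases h : PySem.Str.slice? (PySem.Str.lower word) none none (-1) = some (PySem.Str.lower word)
  · rw [if_pos h, if_pos ((pvTest_eq word).mp h)]
  · rw [if_neg h, if_neg (by intro hb; exact h ((pvTest_eq word).mpr hb))]
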